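-- pv_equiv track=rewrite | github.com/udhaykumarbala/extractor | app.py | is_valid_meter_number
-- ===== SOURCE A (Python) =====
-- def is_valid_meter_number(meter_num: str) -> bool:
--     """Validate if a string is likely to be a meter number."""
--     # Most meter numbers are 5-15 digits long, may include dashes
--     if not meter_num or len(meter_num) < 5 or len(meter_num) > 15:
--         return False
--
--     # Should contain at least some digits
--     if not any(c.isdigit() for c in meter_num):
--         return False
--
--     # Should not be mostly letters
--     letter_count = sum(c.isalpha() for c in meter_num)
--     if letter_count > len(meter_num) / 2:
--         return False
--
--     return True
-- ===== SOURCE B (Python) =====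
-- def is_valid_meter_number(meter_num: str) -> bool:
--     """Validate if a string is likely to be a meter number.
--
--     Early-exit recursive scan: carry a letter budget of len//2 and a
--     seen-digit flag; fail immediately the moment a letter would exceed
--     the budget, and at the end succeed iff a digit was seen.
--     """
--     n = len(meter_num)
--     if n < 5 or n > 15:
--         return False
--
--     def go(i, seen_digit, budget):
--         if i == n:
--             return seen_digit
--         c = meter_num[i]
--         if c.isalpha():
--             if budget == 0:
--                 return False
--             return go(i + 1, seen_digit, budget - 1)
--         return go(i + 1, seen_digit or c.isdigit(), budget)
--
--     return go(0, False, n // 2)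
-- ===== Notes on version B (the rewrite author's own statement) =====
-- stated objective: alternative
-- what changed: Replaces A's three staged whole-string scans (length guard, any() digit scan, sum() letter count compared with len/2) by a single early-exit recursion that threads a letter budget of len//2 and a seen-digit flag, returning False the moment a letter would overdraw the budget (correct since an integer count exceeds len/2 iff it exceeds len//2).
import Mathlib
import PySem

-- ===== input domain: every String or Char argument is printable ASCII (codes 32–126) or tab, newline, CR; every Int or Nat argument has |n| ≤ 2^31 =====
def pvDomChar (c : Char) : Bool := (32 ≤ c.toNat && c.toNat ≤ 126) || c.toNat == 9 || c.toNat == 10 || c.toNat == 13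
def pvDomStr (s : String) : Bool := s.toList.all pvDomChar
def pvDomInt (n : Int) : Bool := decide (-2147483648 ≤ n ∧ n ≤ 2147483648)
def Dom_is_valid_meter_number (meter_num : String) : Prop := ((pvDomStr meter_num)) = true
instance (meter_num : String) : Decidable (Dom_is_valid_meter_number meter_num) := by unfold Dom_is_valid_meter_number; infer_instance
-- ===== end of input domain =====

-- B replaces A's three staged scans by one early-exit recursion threading a letter
-- budget of len//2 and a seen-digit flag; objective: alternative (same cost).

-- ===== PORT A =====
-- A's staged scans: emptiness/length guard, 'any(c.isdigit() ...)', then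
-- 'sum(c.isalpha() ...)'.  'letter_count > len(meter_num) / 2' (a float comparison in
-- Python) is ported as the exact integer test 2*letter_count > len (no rounding is lost).
def is_valid_meter_number (meter_num : String) : Bool :=
  let cs := meter_num.toList
  if cs.isEmpty || cs.length < 5 || cs.length > 15 then false
  else if !(cs.any (fun c => PySem.Chars.isdigit c)) then false
  else
    let letter_count := (cs.map (fun c => if PySem.Chars.isalpha c then (1 : Nat) else 0)).sum
    if 2 * letter_count > cs.length then false
    else true

-- ===== PORT B =====
-- B's recursive early-exit scan (the index recursion 'go' ported as structural
-- recursion on the remaining characters, same state: seen-digit flag, letter budget).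
def pvGo : List Char → Bool → Nat → Bool
  | [], seen_digit, _ => seen_digit
  | c :: rest, seen_digit, budget =>
    if PySem.Chars.isalpha c then
      if budget = 0 then false
      else pvGo rest seen_digit (budget - 1)
    else pvGo rest (seen_digit || PySem.Chars.isdigit c) budget

def is_valid_meter_number_alt (meter_num : String) : Bool :=
  let cs := meter_num.toList
  let n := cs.length
  if n < 5 || n > 15 then false
  else pvGo cs false (n / 2)

-- ===== PRECONDITION & SPEC =====
def Spec_is_valid_meter_number (meter_num : String) (out : Bool) : Prop := out = is_valid_meter_number_alt meter_num
instance (meter_num : String) (out : Bool) : Decidable (Spec_is_valid_meter_number meter_num out) := by unfold Spec_is_valid_meter_number; infer_instance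

-- ===== CLAIM (what is proved, stated in full; the proofs are below) =====
def Claim_equal_is_valid_meter_number : Prop := ∀ (meter_num : String), Dom_is_valid_meter_number meter_num → Spec_is_valid_meter_number meter_num (is_valid_meter_number meter_num)

-- ===== LEMMAS AND PROOFS =====

-- A digit character is never a letter.
theorem pv_digit_not_alpha (c : Char) (h : PySem.Chars.isdigit c = true) :
    PySem.Chars.isalpha c = false := by
  simp only [PySem.Chars.isdigit, PySem.Chars.isalpha, PySem.Chars.isupper, PySem.Chars.islower,
    Bool.and_eq_true, decide_eq_true_eq, Char.le_def, UInt32.le_iff_toNat_le] at h ⊢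
  simp only [Bool.or_eq_false_iff, Bool.and_eq_false_iff, decide_eq_false_iff_not,
    UInt32.le_iff_toNat_le]
  have h0 : '0'.val.toNat = 48 := rfl
  have h9 : '9'.val.toNat = 57 := rfl
  have hA : 'A'.val.toNat = 65 := rfl
  have hZ : 'Z'.val.toNat = 90 := rfl
  have ha : 'a'.val.toNat = 97 := rfl
  have hz : 'z'.val.toNat = 122 := rfl
  omega

-- Characterisation of the early-exit recursion: it returns false iff the letters
-- exceed the budget, and otherwise "flag already set, or some digit ahead".
theorem pv_go_spec (cs : List Char) (seen : Bool) (budget : Nat) :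
    pvGo cs seen budget
      = if cs.countP (fun c => PySem.Chars.isalpha c) ≤ budget
          then seen || cs.any (fun c => PySem.Chars.isdigit c)
          else false := by
  induction cs generalizing seen budget with
  | nil => simp [pvGo]
  | cons c rest ih =>
    simp only [pvGo, List.countP_cons, List.any_cons]
    by_cases ha : PySem.Chars.isalpha c = true
    · have hd : PySem.Chars.isdigit c = false := by
        by_contra h
        have := pv_digit_not_alpha c (by revert h; cases PySem.Chars.isdigit c <;> simp)
        simp [this] at ha
      by_cases hb : budget = 0
      · simp [ha, hb, hd]
      · simp only [ha, if_neg hb, if_pos rfl, ih, hd, Bool.false_or, decide_true, if_true]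
        by_cases hle : rest.countP (fun c => PySem.Chars.isalpha c) ≤ budget - 1
        · rw [if_pos hle, if_pos (by omega)]
        · rw [if_neg hle, if_neg (by omega)]
    · have ha' : PySem.Chars.isalpha c = false := by
        revert ha; cases PySem.Chars.isalpha c <;> simp
      simp only [ha', Bool.false_eq_true, if_false, ih, ha, Bool.or_assoc, decide_false,
        Nat.add_zero, if_false]

-- Letters counted by A's map-sum equal countP.
theorem pv_sum_countP (cs : List Char) :
    (cs.map (fun c => if PySem.Chars.isalpha c then (1 : Nat) else 0)).sum
      = cs.countP (fun c => PySem.Chars.isalpha c) := by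
  induction cs with
  | nil => simp
  | cons c rest ih =>
    simp only [List.map_cons, List.sum_cons, List.countP_cons, ih]
    by_cases h : PySem.Chars.isalpha c = true <;> simp [h, Nat.add_comm]

-- ===== VERDICT (by name: the statement is the Claim_ definition above) =====
theorem is_valid_meter_number_spec : Claim_equal_is_valid_meter_number := by
  intro s _
  unfold Spec_is_valid_meter_number is_valid_meter_number is_valid_meter_number_alt
  simp only [pv_go_spec, pv_sum_countP, Bool.false_or]
  generalize s.toList = cs
  cases cs with
  | nil => simp
  | cons c rest =>
    simp only [List.isEmpty_cons, Bool.false_or]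
    split_ifs with h1 h2 h3 h4 h5 h6 h7
    all_goals try rfl
    all_goals try omega
    all_goals simp_all
    rcases Bool.eq_false_or_eq_true (PySem.Chars.isdigit c) with h | h
    · exact Or.inl h
    · exact Or.inr (h2 h)
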